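-- pv_equiv track=rewrite | github.com/AngelAbrego/AngelAbrego | Bagels.py | obtPistas
-- ===== SOURCE A (Python) =====
-- def obtPistas(suposicion, secretNum):
--     """"Devuelve una cadena con las pistas pico, fermi, bagels
--     para una conjetura y un par de números secretos"""
--     if suposicion == secretNum:
--         return 'Lo tienes!'
--
--     Pistas = []
--
--     for i in range(len(suposicion)):
--         if suposicion[i] == secretNum[i]:
--             # Un dígito correcto está en el lugar correcto.
--             Pistas.append('Fermi ')
--         elif suposicion[i] in secretNum:
--             # Un digito correcto en el lugar incorrecto.
--             Pistas.append('Pico ')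
--     if len(Pistas) == 0:
--         return 'Bagels' # No hay dígitos correctos en absoluto.
--     else:
--         # Clasifica las pistas en orden alfabético para que su orden original.
--         # No da informacion.
--         Pistas.sort()
--         # Haz una sola cadena de la lista de pistas de cadenas.
--         return ''.join(Pistas)
-- ===== SOURCE B (Python) =====
-- def obtPistas(suposicion, secretNum):
--     if suposicion == secretNum:
--         return 'Lo tienes!'
--     fermi = 0
--     pico = 0
--     for i in range(len(suposicion)):
--         if suposicion[i] == secretNum[i]:
--             fermi += 1
--         elif suposicion[i] in secretNum:
--             pico += 1
--     if fermi == 0 and pico == 0: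
--         return 'Bagels'
--     return 'Fermi ' * fermi + 'Pico ' * pico
-- ===== Notes on version B (the rewrite author's own statement) =====
-- stated objective: simpler
-- what changed: B counts matches in two integer counters (fermi/pico) and builds the result by string repetition 'Fermi '*fermi + 'Pico '*pico, instead of accumulating a list of hint strings, sorting it and joining.
import Mathlib
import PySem

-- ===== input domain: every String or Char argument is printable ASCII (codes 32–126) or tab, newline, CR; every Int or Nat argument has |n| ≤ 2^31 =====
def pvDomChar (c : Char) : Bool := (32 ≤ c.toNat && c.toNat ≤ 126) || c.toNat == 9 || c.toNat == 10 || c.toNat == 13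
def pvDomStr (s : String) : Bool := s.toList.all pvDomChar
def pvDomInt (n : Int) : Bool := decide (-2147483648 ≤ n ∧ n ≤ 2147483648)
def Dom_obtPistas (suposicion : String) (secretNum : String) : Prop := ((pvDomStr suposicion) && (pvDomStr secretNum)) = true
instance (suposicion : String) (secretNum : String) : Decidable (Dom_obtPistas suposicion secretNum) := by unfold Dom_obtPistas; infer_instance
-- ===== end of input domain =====

-- B replaces A's list-of-hints + sort + join by two integer counters and string
-- repetition 'Fermi '*fermi + 'Pico '*pico (the sorted hint list is exactly that
-- shape); objective: simpler.

-- ===== PORT A =====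
def obtPistas (suposicion : String) (secretNum : String) : String :=
  if suposicion == secretNum then "Lo tienes!"
  else
    let sl := suposicion.toList
    let tl := secretNum.toList
    let pistas : List String :=
      (PySem.List.pyRange 0 (sl.length : Int) 1).foldl (fun acc i =>
        if PySem.List.pyGetD sl i ' ' == PySem.List.pyGetD tl i ' ' then acc ++ ["Fermi "]
        else if PySem.Chars.isIn [PySem.List.pyGetD sl i ' '] tl then acc ++ ["Pico "]
        else acc) []
    if pistas.length == 0 then "Bagels"
    else PySem.Str.join "" (PySem.List.sorted pistas (fun x => x) false)

-- ===== PORT B =====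
-- Python's 'Fermi ' * n (string repetition), ported by hand (exact: n copies concatenated)
def pyStrMul (s : String) : Nat → String
  | 0 => ""
  | n + 1 => s ++ pyStrMul s n

def obtPistas_alt (suposicion : String) (secretNum : String) : String :=
  if suposicion == secretNum then "Lo tienes!"
  else
    let sl := suposicion.toList
    let tl := secretNum.toList
    let fp : Nat × Nat :=
      (PySem.List.pyRange 0 (sl.length : Int) 1).foldl (fun fp i =>
        if PySem.List.pyGetD sl i ' ' == PySem.List.pyGetD tl i ' ' then (fp.1 + 1, fp.2)
        else if PySem.Chars.isIn [PySem.List.pyGetD sl i ' '] tl then (fp.1, fp.2 + 1)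
        else fp) (0, 0)
    if fp.1 == 0 && fp.2 == 0 then "Bagels"
    else pyStrMul "Fermi " fp.1 ++ pyStrMul "Pico " fp.2

-- ===== PRECONDITION & SPEC =====
-- Pre_ excludes exactly the inputs where A raises IndexError: a guess longer than
-- the (different) secret makes secretNum[i] go out of range.
def Pre_obtPistas (suposicion : String) (secretNum : String) : Prop :=
  suposicion = secretNum ∨ suposicion.toList.length ≤ secretNum.toList.length
instance (suposicion : String) (secretNum : String) : Decidable (Pre_obtPistas suposicion secretNum) := by unfold Pre_obtPistas; infer_instance

def pvWitness_obtPistas : String × String := ("12", "13")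

def Spec_obtPistas (suposicion : String) (secretNum : String) (out : String) : Prop := out = obtPistas_alt suposicion secretNum
instance (suposicion : String) (secretNum : String) (out : String) : Decidable (Spec_obtPistas suposicion secretNum out) := by unfold Spec_obtPistas; infer_instance

-- ===== CLAIM (what is proved, stated in full; the proofs are below) =====
def Claim_equal_obtPistas : Prop := ∀ (suposicion : String) (secretNum : String), Dom_obtPistas suposicion secretNum → Pre_obtPistas suposicion secretNum → Spec_obtPistas suposicion secretNum (obtPistas suposicion secretNum)

-- ===== LEMMAS AND PROOFS =====

-- loop invariant: A's hint list is a permutation of fermi copies of "Fermi "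
-- followed by pico copies of "Pico ", for B's counter pair.
theorem loop_perm (sl tl : List Char) (is : List Int) :
    ∀ (acc : List String) (fp : Nat × Nat),
      acc.Perm (List.replicate fp.1 "Fermi " ++ List.replicate fp.2 "Pico ") →
      (is.foldl (fun acc i =>
        if PySem.List.pyGetD sl i ' ' == PySem.List.pyGetD tl i ' ' then acc ++ ["Fermi "]
        else if PySem.Chars.isIn [PySem.List.pyGetD sl i ' '] tl then acc ++ ["Pico "]
        else acc) acc).Perm
      (List.replicate (is.foldl (fun fp i =>
        if PySem.List.pyGetD sl i ' ' == PySem.List.pyGetD tl i ' ' then (fp.1 + 1, fp.2)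
        else if PySem.Chars.isIn [PySem.List.pyGetD sl i ' '] tl then (fp.1, fp.2 + 1)
        else fp) fp).1 "Fermi " ++
       List.replicate (is.foldl (fun fp i =>
        if PySem.List.pyGetD sl i ' ' == PySem.List.pyGetD tl i ' ' then (fp.1 + 1, fp.2)
        else if PySem.Chars.isIn [PySem.List.pyGetD sl i ' '] tl then (fp.1, fp.2 + 1)
        else fp) fp).2 "Pico ") := by
  induction is with
  | nil => intro acc fp h; exact h
  | cons i is ih =>
    intro acc fp h
    simp only [List.foldl_cons]
    split_ifs with h1 h2
    · apply ih
      refine List.Perm.trans (List.perm_append_comm (l₁ := acc) (l₂ := ["Fermi "])) ?_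
      exact h.cons "Fermi "
    · apply ih
      refine List.Perm.trans (List.perm_append_comm (l₁ := acc) (l₂ := ["Pico "])) ?_
      refine List.Perm.trans (h.cons "Pico ") ?_
      exact List.perm_middle.symm
    · exact ih acc fp h

theorem pyStrMul_toList (s : String) (n : Nat) :
    (pyStrMul s n).toList = (List.replicate n s.toList).flatten := by
  induction n with
  | zero => rfl
  | succ n ih => simp [pyStrMul, ih, List.replicate_succ]

theorem join_nil_flatten : ∀ l : List (List Char), PySem.Chars.join [] l = l.flatten
  | [] => by simp [PySem.Chars.join, List.intercalate]
  | [a] => by simp [PySem.Chars.join, List.intercalate]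
  | a :: b :: t => by
      rw [PySem.Chars.join_cons_cons, join_nil_flatten (b :: t)]; simp

theorem join_repl (a b : Nat) :
    PySem.Str.join "" (List.replicate a "Fermi " ++ List.replicate b "Pico ")
      = pyStrMul "Fermi " a ++ pyStrMul "Pico " b := by
  apply String.toList_inj.mp
  simp [PySem.Str.join, join_nil_flatten, String.toList_append, pyStrMul_toList,
        List.map_replicate]

theorem sorted_repl (xs : List String) (a b : Nat)
    (h : xs.Perm (List.replicate a "Fermi " ++ List.replicate b "Pico ")) :
    PySem.List.sorted xs (fun x => x) false
      = List.replicate a "Fermi " ++ List.replicate b "Pico " := by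
  apply PySem.List.sorted_id_eq_of_perm_of_pairwise _ _ h.symm
  rw [List.pairwise_append]
  refine ⟨?_, ?_, ?_⟩
  · exact List.pairwise_replicate.mpr (Or.inr (le_refl _))
  · exact List.pairwise_replicate.mpr (Or.inr (le_refl _))
  · intro x hx y hy
    rw [List.eq_of_mem_replicate hx, List.eq_of_mem_replicate hy]
    exact le_of_lt (by rw [String.lt_iff_toList_lt]; decide)

-- ===== VERDICT (by name: the statement is the Claim_ definition above) =====
theorem obtPistas_spec : Claim_equal_obtPistas := by
  intro sup sec _ _
  unfold Spec_obtPistas obtPistas obtPistas_alt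
  by_cases he : sup == sec
  · simp [he]
  · simp only [he, if_false, Bool.false_eq_true]
    have hperm := loop_perm sup.toList sec.toList
      (PySem.List.pyRange 0 (sup.toList.length : Int) 1) [] (0, 0) (by simp)
    set fp := (PySem.List.pyRange 0 (sup.toList.length : Int) 1).foldl _ ((0, 0) : Nat × Nat) with hfp
    set pistas := (PySem.List.pyRange 0 (sup.toList.length : Int) 1).foldl _ ([] : List String) with hp
    have hlen : pistas.length = fp.1 + fp.2 := by
      have := hperm.length_eq; simpa using this
    by_cases hz : fp.1 = 0 ∧ fp.2 = 0
    · simp [hz.1, hz.2, hlen]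
    · have hne : pistas.length ≠ 0 := by omega
      have hne2 : ¬ (fp.1 == 0 && fp.2 == 0) = true := by
        simp only [Bool.and_eq_true, beq_iff_eq]; exact hz
      simp only [hne, hne2, if_false, beq_iff_eq]
      rw [sorted_repl pistas fp.1 fp.2 hperm, join_repl]
      simp
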